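-- pv_equiv track=rewrite | github.com/Morhuhan/e_library_module | parser/bbk_csv_to_sql.py | collect_records
-- ===== SOURCE A (Python) =====
-- HEADER_TAG   = ("bbk_full", "ББК.", "Рабочие таблицы")
--
-- def is_header(row) -> bool:
--     return (not any(c.strip() for c in row) or
--             row[0].strip().startswith(HEADER_TAG))
--
-- def strip_lead_comma(txt: str) -> str:
--     return txt.lstrip().lstrip(',').lstrip()
--
-- def collect_records(reader):
--     """
--     Склеивает строки и возвращает список [bbk_abb, description]
--     (только те, у кого описание не пустое).
--     """
--     records, cur = [], None
--     for raw in reader: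
--         if is_header(raw):
--             continue
--
--         row = [(raw[i] if i < len(raw) else "").strip() for i in range(4)]
--
--         has_codes = any(row[:2])           # bbk_full или bbk_abb
--         if has_codes:
--             if cur and cur[1]:
--                 records.append(cur)
--             abb  = row[1] or row[0]
--             desc = row[2]
--             cur  = [abb, desc]
--         else:
--             if cur is None:
--                 continue
--             if row[2]:
--                 cur[1] = f"{cur[1]} {strip_lead_comma(row[2])}".strip()
--
--     if cur and cur[1]:
--         records.append(cur)
--
--     return records
-- ===== SOURCE B (Python) =====
-- HEADER_TAG   = ("bbk_full", "ББК.", "Рабочие таблицы")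
--
-- def is_header(row) -> bool:
--     return (not any(c.strip() for c in row) or
--             row[0].strip().startswith(HEADER_TAG))
--
-- def strip_lead_comma(txt: str) -> str:
--     return txt.lstrip().lstrip(',').lstrip()
--
-- def _normalize(raw):
--     return [(raw[i] if i < len(raw) else "").strip() for i in range(4)]
--
-- def _has_codes(row):
--     return bool(row[0] or row[1])
--
-- def _build(rows):
--     """rows starts with a code row (or is empty); one group (head + its
--     code-less continuation rows) is consumed and emitted per outer step."""
--     records = []
--     i, n = 0, len(rows)
--     while i < n:
--         head = rows[i]
--         desc = head[2]
--         i += 1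
--         while i < n and not _has_codes(rows[i]):
--             if rows[i][2]:
--                 desc = f"{desc} {strip_lead_comma(rows[i][2])}".strip()
--             i += 1
--         if desc:
--             records.append([head[1] or head[0], desc])
--     return records
--
-- def collect_records(reader):
--     rows = [_normalize(raw) for raw in reader if not is_header(raw)]
--     k = 0
--     while k < len(rows) and not _has_codes(rows[k]):
--         k += 1
--     return _build(rows[k:])
-- ===== Notes on version B (the rewrite author's own statement) =====
-- stated objective: simpler
-- what changed: A's single stateful loop carrying (records, cur) with a trailing flush is replaced by a pipeline: filter out header rows and normalize, drop leading code-less rows, then consume one code-row group at a time (head + its continuation rows) and emit its record directly, so no mutable current-record state or end-of-loop flush remains.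
import Mathlib
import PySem

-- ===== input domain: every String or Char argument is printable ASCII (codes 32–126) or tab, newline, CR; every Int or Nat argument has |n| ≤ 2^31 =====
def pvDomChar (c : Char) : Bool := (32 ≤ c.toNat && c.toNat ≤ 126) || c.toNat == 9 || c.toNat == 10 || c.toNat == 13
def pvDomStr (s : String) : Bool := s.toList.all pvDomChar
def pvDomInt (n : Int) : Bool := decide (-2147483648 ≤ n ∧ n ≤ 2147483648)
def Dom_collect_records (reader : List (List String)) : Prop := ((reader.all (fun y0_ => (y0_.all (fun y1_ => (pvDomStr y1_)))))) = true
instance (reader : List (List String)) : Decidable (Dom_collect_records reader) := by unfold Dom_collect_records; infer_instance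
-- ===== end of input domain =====

-- B restructures A's single stateful loop into filter-headers → drop leading code-less rows → consume one group at a time (objective: simpler decomposition, same cost).

-- ===== PORT A =====
-- helpers shared verbatim by Source A and Source B (HEADER_TAG, is_header, strip_lead_comma, the row
-- normalisation and the f-string description join appear identically in both sources)
def HEADER_TAG : List String := ["bbk_full", "ББК.", "Рабочие таблицы"]

def is_header (row : List String) : Bool :=
  -- not any(c.strip() for c in row) or row[0].strip().startswith(HEADER_TAG)
  -- row[0] is only evaluated when the first disjunct is false, i.e. row ≠ []
  (!(row.any fun c => !(PySem.Str.strip c == ""))) ||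
    (HEADER_TAG.any fun t => PySem.Str.startswith (PySem.Str.strip (PySem.List.pyGetD row 0 "")) t)

def strip_lead_comma (txt : String) : String :=
  -- txt.lstrip().lstrip(',').lstrip(); lstrip(',') ported by hand as dropWhile (· == ','),
  -- exact: Python's lstrip(chars) drops leading characters of the set
  String.ofList (PySem.Chars.lstrip ((PySem.Chars.lstrip txt.toList).dropWhile (· == ',')))

def normRow (raw : List String) : List String :=
  -- [(raw[i] if i < len(raw) else "").strip() for i in range(4)]
  (PySem.List.pyRange 0 4 1).map fun i =>
    PySem.Str.strip (if i < PySem.List.len raw then PySem.List.pyGetD raw i "" else "")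

def joinDesc (d t : String) : String :=
  -- f"{d} {strip_lead_comma(t)}".strip()
  String.ofList (PySem.Chars.strip (d ++ " " ++ strip_lead_comma t).toList)

-- A's loop: state = (records, cur); cur = None ∣ [abb, desc] as Option (String × String)
def loopA : List (List String) → List (List String) → Option (String × String) → List (List String)
  | [], records, cur =>
      -- trailing: if cur and cur[1]: records.append(cur)
      match cur with
      | some (a, d) => if d ≠ "" then records ++ [[a, d]] else records
      | none => records
  | raw :: rest, records, cur =>
      if is_header raw then loopA rest records cur
      else
        let row := normRow raw
        let has_codes := (PySem.List.slice row none (some 2)).any fun s => !(s == "")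
        if has_codes then
          let records' := match cur with
            | some (a, d) => if d ≠ "" then records ++ [[a, d]] else records
            | none => records
          let abb := if PySem.List.pyGetD row 1 "" ≠ "" then PySem.List.pyGetD row 1 ""
                     else PySem.List.pyGetD row 0 ""
          loopA rest records' (some (abb, PySem.List.pyGetD row 2 ""))
        else
          match cur with
          | none => loopA rest records none
          | some (a, d) =>
              let d' := if PySem.List.pyGetD row 2 "" ≠ ""
                        then joinDesc d (PySem.List.pyGetD row 2 "") else d
              loopA rest records (some (a, d'))

def collect_records (reader : List (List String)) : List (List String) :=
  loopA reader [] none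

-- ===== PORT B =====
def hasCodesB (row : List String) : Bool :=
  !(PySem.List.pyGetD row 0 "" == "") || !(PySem.List.pyGetD row 1 "" == "")

def abbB (head : List String) : String :=
  if PySem.List.pyGetD head 1 "" ≠ "" then PySem.List.pyGetD head 1 ""
  else PySem.List.pyGetD head 0 ""

-- the inner while of _build: eat code-less rows, folding their col-2 into desc
def consumeB : String → List (List String) → String × List (List String)
  | desc, [] => (desc, [])
  | desc, row :: rest =>
      if hasCodesB row then (desc, row :: rest)
      else
        let desc' := if PySem.List.pyGetD row 2 "" ≠ ""
                     then joinDesc desc (PySem.List.pyGetD row 2 "") else desc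
        consumeB desc' rest

theorem consumeB_len_le (d : String) (l : List (List String)) :
    (consumeB d l).2.length ≤ l.length := by
  induction l generalizing d with
  | nil => simp [consumeB]
  | cons row rest ih =>
      simp only [consumeB]
      split
      · simp
      · exact le_trans (ih _) (by simp)

def buildB (rows : List (List String)) : List (List String) :=
  match rows with
  | [] => []
  | head :: rest0 =>
      let p := consumeB (PySem.List.pyGetD head 2 "") rest0
      (if p.1 ≠ "" then [[abbB head, p.1]] else []) ++ buildB p.2
termination_by rows.length
decreasing_by
  simpa using Nat.lt_succ_of_le (consumeB_len_le (PySem.List.pyGetD head 2 "") rest0)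

def collect_records_alt (reader : List (List String)) : List (List String) :=
  let rows := (reader.filter fun raw => !is_header raw).map normRow
  buildB (rows.dropWhile fun r => !hasCodesB r)

-- ===== PRECONDITION & SPEC =====
def Spec_collect_records (reader : List (List String)) (out : List (List String)) : Prop := out = collect_records_alt reader
instance (reader : List (List String)) (out : List (List String)) : Decidable (Spec_collect_records reader out) := by unfold Spec_collect_records; infer_instance

-- ===== CLAIM (what is proved, stated in full; the proofs are below) =====
def Claim_equal_collect_records : Prop := ∀ (reader : List (List String)), Dom_collect_records reader → Spec_collect_records reader (collect_records reader)

-- ===== LEMMAS AND PROOFS =====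

def nr (raw : List String) (i : Int) : String :=
  PySem.Str.strip (if i < PySem.List.len raw then PySem.List.pyGetD raw i "" else "")

theorem normRow_explicit (raw : List String) :
    normRow raw = [nr raw 0, nr raw 1, nr raw 2, nr raw 3] := by
  have h4 : PySem.List.pyRange 0 4 1 = [0, 1, 2, 3] := by decide
  simp [normRow, h4, nr]

theorem has_codes_eq (raw : List String) :
    ((PySem.List.slice (normRow raw) none (some 2)).any fun s => !(s == "")) =
      hasCodesB (normRow raw) := by
  rw [normRow_explicit, PySem.List.slice_to _ (by norm_num)]
  simp [hasCodesB, PySem.List.pyGetD, Bool.or_comm]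

-- one unfolding step of buildB on a cons
theorem buildB_cons (head : List String) (rest0 : List (List String)) :
    buildB (head :: rest0) =
      (if (consumeB (PySem.List.pyGetD head 2 "") rest0).1 ≠ "" then
          [[abbB head, (consumeB (PySem.List.pyGetD head 2 "") rest0).1]] else []) ++
        buildB (consumeB (PySem.List.pyGetD head 2 "") rest0).2 := by
  rw [buildB]

theorem loopA_acc (l : List (List String)) (recs : List (List String))
    (cur : Option (String × String)) :
    loopA l recs cur = recs ++ loopA l [] cur := by
  induction l generalizing recs cur with
  | nil =>
      match cur with
      | none => simp [loopA]
      | some (a, d) => by_cases hd : d = "" <;> simp [loopA, hd]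
  | cons raw rest ih =>
      by_cases hh : is_header raw
      · simp only [loopA, hh, if_true]; exact ih recs cur
      · match cur with
        | none =>
            simp only [loopA, hh, Bool.false_eq_true, if_false]
            split
            · exact ih recs _
            · exact ih recs none
        | some (a, d) =>
            simp only [loopA, hh, Bool.false_eq_true, if_false]
            split
            · by_cases hd : d = ""
              · simp only [hd, ne_eq, not_true_eq_false, if_false]
                exact ih recs _
              · simp only [hd, ne_eq, not_false_eq_true, if_true]
                rw [ih (recs ++ [[a, d]]), ih ([] ++ [[a, d]])]
                simp
            · exact ih recs _

theorem loopA_some (l : List (List String)) (a d : String) :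
    loopA l [] (some (a, d)) =
      (if (consumeB d ((l.filter fun raw => !is_header raw).map normRow)).1 ≠ "" then
          [[a, (consumeB d ((l.filter fun raw => !is_header raw).map normRow)).1]] else []) ++
        buildB (consumeB d ((l.filter fun raw => !is_header raw).map normRow)).2 := by
  induction l generalizing a d with
  | nil => by_cases hd : d = "" <;> simp [loopA, consumeB, buildB, hd]
  | cons raw rest ih =>
      by_cases hh : is_header raw
      · simpa [loopA, hh] using ih a d
      · have hF : ((raw :: rest).filter fun r => !is_header r)
            = raw :: (rest.filter fun r => !is_header r) := by
          simp [hh]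
        rw [hF, List.map_cons]
        simp only [loopA, hh, Bool.false_eq_true, if_false]
        rw [has_codes_eq raw, consumeB]
        by_cases hc : hasCodesB (normRow raw)
        · simp only [hc, if_true]
          rw [buildB_cons, loopA_acc, ih, abbB]
          by_cases hd : d = "" <;> simp [hd]
        · simp only [hc, Bool.false_eq_true, if_false]
          exact ih a _

theorem loopA_none (l : List (List String)) :
    loopA l [] none =
      buildB (((l.filter fun raw => !is_header raw).map normRow).dropWhile
        fun r => !hasCodesB r) := by
  induction l with
  | nil => simp [loopA, buildB]
  | cons raw rest ih =>
      by_cases hh : is_header raw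
      · simpa [loopA, hh] using ih
      · have hF : ((raw :: rest).filter fun r => !is_header r)
            = raw :: (rest.filter fun r => !is_header r) := by
          simp [hh]
        rw [hF, List.map_cons, List.dropWhile_cons]
        simp only [loopA, hh, Bool.false_eq_true, if_false]
        rw [has_codes_eq raw]
        by_cases hc : hasCodesB (normRow raw)
        · simp only [hc, Bool.not_true, Bool.false_eq_true, if_true, if_false]
          rw [buildB_cons, loopA_some rest _ _, abbB]
        · simpa [hc] using ih

-- ===== VERDICT (by name: the statement is the Claim_ definition above) =====
theorem collect_records_spec : Claim_equal_collect_records := by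
  intro reader _
  unfold Spec_collect_records collect_records collect_records_alt
  exact loopA_none reader
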